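-- pv_equiv track=rewrite | github.com/BarbosaJackson/PAA | thehuxley/2180-o-macaco-e-o-bambu-oleoso.py | define_strength
-- ===== SOURCE A (Python) =====
-- def define_strength(steps):
-- 	qtd_steps = len(steps)
-- 	if(qtd_steps == 1):
-- 		return steps[0]
-- 	elif(qtd_steps == 2):
-- 		if(steps[0] != steps[1] - steps[0]):
-- 			return max(steps[0], steps[1] - steps[0])
-- 		else:
-- 			return steps[0] + 1
-- 	else:
-- 		final_strength = 2
-- 		while True:
-- 			strength = final_strength
-- 			flag = False
-- 			previous = 0
-- 			for i in range(0, qtd_steps):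
-- 				if(strength < steps[i] - previous):
-- 					flag = False
-- 					break
-- 				else:
-- 					flag = True
-- 				if(strength == steps[i] - previous):
-- 					strength -= 1
-- 				previous = steps[i]
-- 			if(flag):
-- 				return final_strength
-- 			final_strength += 1
-- ===== SOURCE B (Python) =====
-- def define_strength(steps):
--     n = len(steps)
--     if n == 1:
--         return steps[0]
--     if n == 2:
--         first, second = steps[0], steps[1] - steps[0]
--         return max(first, second) if first != second else first + 1
--     gaps = [b - a for a, b in zip([0] + steps, steps)]
--
--     def feasible(s):
--         for g in gaps:
--             if s < g:
--                 return False
--             if s == g: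
--                 s -= 1
--         return True
--
--     lo, hi = 2, max(max(gaps) + n, 2)
--     while lo < hi:
--         mid = (lo + hi) // 2
--         if feasible(mid):
--             hi = mid
--         else:
--             lo = mid + 1
--     return lo
-- ===== Notes on version B (the rewrite author's own statement) =====
-- stated objective: faster
-- what changed: A's unbounded linear scan over candidate strengths (re-simulating the climb for 2, 3, 4, ... until one succeeds) is replaced by a binary search over the monotone feasibility simulation on a precomputed gap list, between 2 and max(gaps)+n.
import Mathlib
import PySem

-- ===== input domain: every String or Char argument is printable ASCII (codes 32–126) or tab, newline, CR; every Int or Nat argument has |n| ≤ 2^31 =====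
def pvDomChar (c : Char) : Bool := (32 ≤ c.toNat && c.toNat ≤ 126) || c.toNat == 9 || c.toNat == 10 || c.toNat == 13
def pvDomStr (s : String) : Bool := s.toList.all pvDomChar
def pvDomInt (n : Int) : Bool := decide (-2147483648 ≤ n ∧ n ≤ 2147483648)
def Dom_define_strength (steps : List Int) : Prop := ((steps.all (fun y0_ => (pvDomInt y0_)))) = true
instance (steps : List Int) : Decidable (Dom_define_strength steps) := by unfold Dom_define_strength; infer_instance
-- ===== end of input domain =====

-- B replaces A's unbounded linear search over the strength by a binary search over the
-- monotone feasibility simulation (asymptotically fewer simulations); return values agree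
-- on every non-empty list (A loops forever on the empty list).

-- ===== PORT A =====
-- A's inner for-loop: walks the steps keeping `strength` and `previous`;
-- returns the final `flag` (true iff the loop never breaks; the lists reaching it are non-empty).
def goA (strength prev : Int) (steps : List Int) : Bool :=
  match steps with
  | [] => true
  | x :: rest =>
      if strength < x - prev then false
      else goA (if strength == x - prev then strength - 1 else strength) x rest

-- termination helper for A's `while True` (not part of A's computation): any strength
-- at least this bound passes the simulation, so the linear search stops below it.
def boundA (prev : Int) (steps : List Int) : Int :=
  match steps with
  | [] => 0
  | x :: rest => max (x - prev + 1) (boundA x rest)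

theorem goA_of_bound : ∀ (steps : List Int) (prev s : Int),
    boundA prev steps ≤ s → goA s prev steps = true := by
  intro steps
  induction steps with
  | nil => intro prev s _; rfl
  | cons x rest ih =>
      intro prev s h
      simp only [boundA, max_le_iff] at h
      simp only [goA]
      have h1 : ¬ s < x - prev := by omega
      have h2 : (s == x - prev) = false := by simp; omega
      simp only [h1, if_false, h2]
      exact ih x s h.2

-- A's `while True` loop: try final_strength = s, s+1, … until the simulation succeeds.
def loopA (steps : List Int) (s : Int) : Int :=
  if goA s 0 steps then s else loopA steps (s + 1)
termination_by (boundA 0 steps - s).toNat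
decreasing_by
  have hb : ¬ boundA 0 steps ≤ s := fun hle => by
    simp [goA_of_bound steps 0 s hle] at *
  omega

def define_strength (steps : List Int) : Int :=
  let qtd_steps : Int := steps.length
  if qtd_steps = 1 then
    PySem.List.pyGetD steps 0 0
  else if qtd_steps = 2 then
    let a := PySem.List.pyGetD steps 0 0
    let d := PySem.List.pyGetD steps 1 0 - a
    if a ≠ d then max a d else a + 1
  else
    loopA steps 2

-- ===== PORT B =====
-- B's feasibility test over the precomputed gap list.
def feasB (s : Int) (gs : List Int) : Bool :=
  match gs with
  | [] => true
  | g :: rest =>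
      if s < g then false
      else if s == g then feasB (s - 1) rest
      else feasB s rest

-- B's binary search: least strength in [lo, hi] passing feasB (hi is always feasible).
def bsearch (gs : List Int) (lo hi : Int) : Int :=
  if lo < hi then
    if feasB (PySem.Int.floordiv (lo + hi) 2) gs then
      bsearch gs lo (PySem.Int.floordiv (lo + hi) 2)
    else
      bsearch gs (PySem.Int.floordiv (lo + hi) 2 + 1) hi
  else lo
termination_by (hi - lo).toNat
decreasing_by
  · have h := PySem.Int.floordiv_two_mid_bounds (le_of_lt (by assumption : lo < hi))
    have h2 : PySem.Int.floordiv (lo + hi) 2 < hi :=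
      (PySem.Int.floordiv_lt_iff_lt_mul (by omega)).mpr (by omega)
    omega
  · have h := PySem.Int.floordiv_two_mid_bounds (le_of_lt (by assumption : lo < hi))
    omega

def define_strength_alt (steps : List Int) : Int :=
  let n : Int := steps.length
  if n = 1 then
    PySem.List.pyGetD steps 0 0
  else if n = 2 then
    let first := PySem.List.pyGetD steps 0 0
    let second := PySem.List.pyGetD steps 1 0 - first
    if first ≠ second then max first second else first + 1
  else
    let gaps := List.zipWith (fun a b => b - a) (0 :: steps) steps
    let hi := max ((PySem.List.max? gaps (fun y => y)).getD 0 + n) 2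
    bsearch gaps 2 hi

-- ===== PRECONDITION & SPEC =====
-- Pre_ excludes only the empty list, on which A's while-loop never terminates (no return value).
def Pre_define_strength (steps : List Int) : Prop := steps ≠ []
instance (steps : List Int) : Decidable (Pre_define_strength steps) := by
  unfold Pre_define_strength; infer_instance

def pvWitness_define_strength : List Int := [1, 2, 3]

def Spec_define_strength (steps : List Int) (out : Int) : Prop := out = define_strength_alt steps
instance (steps : List Int) (out : Int) : Decidable (Spec_define_strength steps out) := by
  unfold Spec_define_strength; infer_instance

-- ===== CLAIM (what is proved, stated in full; the proofs are below) =====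
def Claim_equal_define_strength : Prop := ∀ (steps : List Int), Dom_define_strength steps → Pre_define_strength steps → Spec_define_strength steps (define_strength steps)

-- ===== LEMMAS AND PROOFS =====

-- A's simulation equals B's simulation on the precomputed gap list.
theorem goA_eq_feasB : ∀ (steps : List Int) (prev s : Int),
    goA s prev steps = feasB s (List.zipWith (fun a b => b - a) (prev :: steps) steps) := by
  intro steps
  induction steps with
  | nil => intro prev s; rfl
  | cons x rest ih =>
      intro prev s
      simp only [List.zipWith, goA, feasB]
      by_cases h1 : s < x - prev
      · simp [h1]
      · by_cases h2 : s = x - prev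
        · simp [h2, ih]
        · have : (s == x - prev) = false := by simp [h2]
          simp [h1, this, ih]

-- feasibility is monotone in the strength.
theorem feasB_mono : ∀ (gs : List Int) (s t : Int),
    s ≤ t → feasB s gs = true → feasB t gs = true := by
  intro gs
  induction gs with
  | nil => intro s t _ _; rfl
  | cons g rest ih =>
      intro s t hst h
      rw [feasB] at h
      by_cases h1 : s < g
      · rw [if_pos h1] at h; exact absurd h (by simp)
      · rw [if_neg h1] at h
        rw [feasB, if_neg (show ¬ t < g by omega)]
        by_cases h2 : s = g
        · rw [if_pos (show (s == g) = true by simp [h2])] at h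
          by_cases h3 : t = g
          · rw [if_pos (show (t == g) = true by simp [h3])]
            have hts : t = s := by omega
            rw [hts]; exact h
          · rw [if_neg (show ¬ (t == g) = true by simp [h3])]
            exact ih (s - 1) t (by omega) h
        · rw [if_neg (show ¬ (s == g) = true by simp [h2])] at h
          rw [if_neg (show ¬ (t == g) = true by simp; omega)]
          exact ih s t hst h

-- a strength at least (every gap + number of gaps) is feasible.
theorem feasB_of_all_le : ∀ (gs : List Int) (s : Int),
    (∀ g ∈ gs, g + (gs.length : Int) ≤ s) → feasB s gs = true := by
  intro gs
  induction gs with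
  | nil => intro s _; rfl
  | cons g rest ih =>
      intro s h
      have hg : g + ((g :: rest).length : Int) ≤ s := h g (List.mem_cons_self)
      simp only [List.length_cons] at hg
      push_cast at hg
      have h1 : ¬ s < g := by omega
      have h2 : (s == g) = false := by simp; omega
      simp only [feasB, h1, if_false, h2]
      apply ih
      intro g' hg'
      have := h g' (List.mem_cons_of_mem _ hg')
      simp only [List.length_cons] at this
      push_cast at this
      omega

-- characterisation of A's linear search: it returns the least feasible strength ≥ s.
theorem loopA_spec (steps : List Int) : ∀ (k : Nat) (s t : Int),
    (t - s).toNat ≤ k → s ≤ t → goA t 0 steps = true →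
    goA (loopA steps s) 0 steps = true ∧ s ≤ loopA steps s ∧ loopA steps s ≤ t ∧
      ∀ u, s ≤ u → u < loopA steps s → goA u 0 steps = false := by
  intro k
  induction k with
  | zero =>
      intro s t hk hst ht
      have hste : s = t := by omega
      subst hste
      rw [loopA, if_pos ht]
      exact ⟨ht, le_refl _, le_refl _, fun u h1 h2 => absurd h2 (by omega)⟩
  | succ k ih =>
      intro s t hk hst ht
      by_cases hs : goA s 0 steps = true
      · rw [loopA, if_pos hs]
        exact ⟨hs, le_refl _, hst, fun u h1 h2 => absurd h2 (by omega)⟩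
      · have hne : s ≠ t := fun h => hs (h ▸ ht)
        obtain ⟨c1, c2, c3, c4⟩ := ih (s + 1) t (by omega) (by omega) ht
        rw [loopA, if_neg hs]
        refine ⟨c1, by omega, c3, fun u h1 h2 => ?_⟩
        by_cases hu : u = s
        · subst hu; simpa using hs
        · exact c4 u (by omega) h2

-- characterisation of B's binary search: it returns the least feasible strength ≥ lo.
theorem bsearch_spec (gs : List Int) : ∀ (k : Nat) (lo hi : Int),
    (hi - lo).toNat ≤ k → lo ≤ hi → feasB hi gs = true →
    lo ≤ bsearch gs lo hi ∧ bsearch gs lo hi ≤ hi ∧ feasB (bsearch gs lo hi) gs = true ∧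
      ∀ u, lo ≤ u → u < bsearch gs lo hi → feasB u gs = false := by
  intro k
  induction k with
  | zero =>
      intro lo hi hk hle hhi
      have hlh : lo = hi := by omega
      subst hlh
      rw [bsearch, if_neg (lt_irrefl lo)]
      exact ⟨le_refl _, le_refl _, hhi, fun u h1 h2 => absurd h2 (by omega)⟩
  | succ k ih =>
      intro lo hi hk hle hhi
      by_cases hlt : lo < hi
      · have hmid := PySem.Int.floordiv_two_mid_bounds hle
        have hmidlt : PySem.Int.floordiv (lo + hi) 2 < hi :=
          (PySem.Int.floordiv_lt_iff_lt_mul (by omega)).mpr (by omega)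
        rw [bsearch, if_pos hlt]
        by_cases hf : feasB (PySem.Int.floordiv (lo + hi) 2) gs = true
        · rw [if_pos hf]
          obtain ⟨c1, c2, c3, c4⟩ := ih lo (PySem.Int.floordiv (lo + hi) 2) (by omega) hmid.1 hf
          exact ⟨c1, by omega, c3, c4⟩
        · rw [if_neg hf]
          obtain ⟨c1, c2, c3, c4⟩ :=
            ih (PySem.Int.floordiv (lo + hi) 2 + 1) hi (by omega) (by omega) hhi
          refine ⟨by omega, c2, c3, fun u h1 h2 => ?_⟩
          by_cases hu : PySem.Int.floordiv (lo + hi) 2 + 1 ≤ u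
          · exact c4 u hu h2
          · cases hval : feasB u gs with
            | false => rfl
            | true => exact absurd (feasB_mono gs u _ (by omega) hval) hf
      · rw [bsearch, if_neg hlt]
        have hlh : lo = hi := by omega
        subst hlh
        exact ⟨le_refl _, le_refl _, hhi, fun u h1 h2 => absurd h2 (by omega)⟩

-- every gap is at most Python's max(gaps).
theorem le_max_getD (gs : List Int) (g : Int) (hg : g ∈ gs) :
    g ≤ (PySem.List.max? gs (fun y => y)).getD 0 := by
  cases hm : PySem.List.max? gs (fun y => y) with
  | none =>
      rw [PySem.List.max?_eq_none_iff] at hm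
      subst hm; cases hg
  | some m =>
      have := PySem.List.max?_isMax hm g hg
      simpa using this

theorem zipWith_gap_length (steps : List Int) :
    (List.zipWith (fun a b => b - a) (0 :: steps) steps).length = steps.length := by
  simp [List.length_zipWith]

-- ===== VERDICT (by name: the statement is the Claim_ definition above) =====
theorem define_strength_spec : Claim_equal_define_strength := by
  intro steps _ hpre
  unfold Spec_define_strength
  rcases steps with _ | ⟨a, _ | ⟨b, _ | ⟨c, rest⟩⟩⟩
  · exact absurd rfl hpre
  · rfl
  · rfl
  · -- main case: length ≥ 3, A's linear search vs B's binary search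
    set steps := a :: b :: c :: rest with hsteps
    have hlen1 : ¬ ((steps.length : Int) = 1) := by simp [hsteps]; omega
    have hlen2 : ¬ ((steps.length : Int) = 2) := by simp [hsteps]; omega
    simp only [define_strength, define_strength_alt, hlen1, hlen2, if_false]
    set gaps := List.zipWith (fun a b => b - a) (0 :: steps) steps with hgaps
    set hi := max ((PySem.List.max? gaps (fun y => y)).getD 0 + (steps.length : Int)) 2 with hhi
    -- hi is feasible
    have hfeas : feasB hi gaps = true := by
      apply feasB_of_all_le
      intro g hg
      have h1 : g ≤ (PySem.List.max? gaps (fun y => y)).getD 0 := le_max_getD gaps g hg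
      have h2 : (gaps.length : Int) = (steps.length : Int) := by
        rw [hgaps, zipWith_gap_length]
      rw [h2]
      have : (PySem.List.max? gaps (fun y => y)).getD 0 + (steps.length : Int) ≤ hi :=
        le_max_left _ _
      omega
    have h2hi : (2 : Int) ≤ hi := le_max_right _ _
    -- bridge A's simulation to B's
    have hbridge : ∀ u : Int, goA u 0 steps = feasB u gaps := fun u => goA_eq_feasB steps 0 u
    have hgoAhi : goA hi 0 steps = true := by rw [hbridge]; exact hfeas
    obtain ⟨a1, a2, a3, a4⟩ :=
      loopA_spec steps (hi - 2).toNat 2 hi (le_refl _) h2hi hgoAhi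
    obtain ⟨b1, b2, b3, b4⟩ :=
      bsearch_spec gaps (hi - 2).toNat 2 hi (le_refl _) h2hi hfeas
    -- both are the least feasible strength ≥ 2, hence equal
    rcases lt_trichotomy (loopA steps 2) (bsearch gaps 2 hi) with h | h | h
    · have hfa := b4 (loopA steps 2) a2 h
      rw [← hbridge] at hfa
      simp [hfa] at a1
    · exact h
    · have hfb := a4 (bsearch gaps 2 hi) b1 h
      rw [hbridge] at hfb
      simp [hfb] at b3
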